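-- pv_equiv track=rewrite | github.com/ITT-25/assignment-06-gesture-recognition-lseegets | game/gesture_application.py | is_valid_gesture
-- ===== SOURCE A (Python) =====
-- def is_valid_gesture(points):
--     if len(points) < 2:
--         return False
--     first = points[0]
--     for p in points[1:]:
--         if p != first:
--             return True
--     return False
-- ===== SOURCE B (Python) =====
-- def is_valid_gesture(points):
--     if len(points) < 2:
--         return False
--     return len(set(points)) > 1
-- ===== Notes on version B (the rewrite author's own statement) =====
-- stated objective: idiomatic
-- what changed: Replaces the early-exit scan comparing each later point to the first with building the set of distinct points in one pass and testing whether it has more than one element.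
import Mathlib
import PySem

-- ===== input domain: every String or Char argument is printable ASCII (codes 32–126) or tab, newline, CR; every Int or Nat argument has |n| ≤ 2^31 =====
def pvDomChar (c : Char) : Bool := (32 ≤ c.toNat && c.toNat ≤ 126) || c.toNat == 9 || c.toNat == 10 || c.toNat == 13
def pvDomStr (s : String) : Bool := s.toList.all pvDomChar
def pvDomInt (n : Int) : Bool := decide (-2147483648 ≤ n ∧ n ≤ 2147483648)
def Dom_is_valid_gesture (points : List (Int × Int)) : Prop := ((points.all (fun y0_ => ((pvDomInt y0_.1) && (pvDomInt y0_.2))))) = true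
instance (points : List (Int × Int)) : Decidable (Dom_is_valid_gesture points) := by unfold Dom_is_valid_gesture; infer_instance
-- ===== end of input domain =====

-- B replaces A's early-exit scan against the first point by building the set of distinct points and testing its size (idiomatic; same cost).

-- ===== PORT A =====
-- literal port: guard len < 2, take first = points[0], scan points[1:] for p ≠ first
def is_valid_gesture (points : List (Int × Int)) : Bool :=
  if points.length < 2 then false
  else
    match points with
    | [] => false
    | first :: rest => rest.any (fun p => p ≠ first)

-- ===== PORT B =====
def is_valid_gesture_alt (points : List (Int × Int)) : Bool :=
  if points.length < 2 then false
  else decide (1 < PySem.Set.len (PySem.Set.ofList points))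

-- ===== PRECONDITION & SPEC =====
def Spec_is_valid_gesture (points : List (Int × Int)) (out : Bool) : Prop := out = is_valid_gesture_alt points
instance (points : List (Int × Int)) (out : Bool) : Decidable (Spec_is_valid_gesture points out) := by unfold Spec_is_valid_gesture; infer_instance

-- ===== CLAIM (what is proved, stated in full; the proofs are below) =====
def Claim_equal_is_valid_gesture : Prop := ∀ (points : List (Int × Int)), Dom_is_valid_gesture points → Spec_is_valid_gesture points (is_valid_gesture points)

-- ===== LEMMAS AND PROOFS =====

-- if every element of rest equals first, set(first::rest) is the singleton [first]
theorem ofList_const {α : Type} [BEq α] [LawfulBEq α] (first : α) (rest : List α)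
    (h : ∀ p ∈ rest, p = first) : PySem.Set.ofList (first :: rest) = [first] := by
  have key : ∀ (l : List α), (∀ p ∈ l, p = first) → l.foldl PySem.Set.add [first] = [first] := by
    intro l
    induction l with
    | nil => intro _; rfl
    | cons x xs ih =>
      intro hx
      have hxf : x = first := hx x (List.mem_cons_self ..)
      have : PySem.Set.add [first] x = [first] := by
        subst hxf; simp [PySem.Set.add, PySem.Set.contains]
      simp only [List.foldl_cons, this]
      exact ih (fun p hp => hx p (List.mem_cons_of_mem _ hp))
  have : PySem.Set.ofList (first :: rest) = rest.foldl PySem.Set.add (PySem.Set.add [] first) := by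
    simp [PySem.Set.ofList_eq_foldl]
  rw [this]
  have : PySem.Set.add ([] : List α) first = [first] := by
    simp [PySem.Set.add, PySem.Set.contains]
  rw [this]
  exact key rest h

theorem main_lemma (first : Int × Int) (rest : List (Int × Int)) :
    (rest.any (fun p => p ≠ first)) = decide (1 < PySem.Set.len (PySem.Set.ofList (first :: rest))) := by
  by_cases hall : ∀ p ∈ rest, p = first
  · have h1 : rest.any (fun p => p ≠ first) = false := by
      simp only [List.any_eq_false]
      intro p hp
      simp [hall p hp]
    rw [h1, ofList_const first rest hall]
    simp [PySem.Set.len]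
  · push Not at hall
    obtain ⟨p, hp, hpne⟩ := hall
    have h1 : rest.any (fun p => p ≠ first) = true := by
      simp only [List.any_eq_true]
      exact ⟨p, hp, by simp [hpne]⟩
    rw [h1]
    -- the set contains two distinct elements and is nodup, so its length > 1
    have hf : first ∈ PySem.Set.ofList (first :: rest) := by
      rw [PySem.Set.mem_ofList]; exact List.mem_cons_self ..
    have hp' : p ∈ PySem.Set.ofList (first :: rest) := by
      rw [PySem.Set.mem_ofList]; exact List.mem_cons_of_mem _ hp
    have hnd : (PySem.Set.ofList (first :: rest)).Nodup := PySem.Set.nodup_ofList _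
    have hlen : 1 < (PySem.Set.ofList (first :: rest)).length := by
      rcases hs : PySem.Set.ofList (first :: rest) with _ | ⟨a, _ | ⟨b, t⟩⟩
      · rw [hs] at hf; simp at hf
      · rw [hs] at hf hp'
        simp at hf hp'
        exact absurd (hp'.trans hf.symm) hpne
      · simp
    simp [PySem.Set.len]
    omega

-- ===== VERDICT (by name: the statement is the Claim_ definition above) =====
theorem is_valid_gesture_spec : Claim_equal_is_valid_gesture := by
  intro points _
  unfold Spec_is_valid_gesture is_valid_gesture is_valid_gesture_alt
  by_cases h : points.length < 2
  · simp [h]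
  · simp only [h, if_false]
    match points with
    | [] => simp at h
    | first :: rest => exact main_lemma first rest
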